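-- pv_equiv track=rewrite | github.com/windhaunting/Coding_practices | LeetCodeSummary/backtracking.py | queryWord
-- ===== SOURCE A (Python) =====
-- def queryWord(dieWord, target):
--     '''
--     check the query word
--     '''
--
--     if not dieWord:
--         return []
--
--     dieWords = [dieWord] * 3           #die number is 3 here
--
--     print ("dieWords: ", dieWords)
--
--
--     def helper(dieWords, currStr, start, ans):
--         #termination base case
--         if start >= len(dieWords):
--             ans.append(currStr)
--             if target == currStr:         #check whether target is in the current result
--                 return True
--             return False
--         letter = dieWords[start]
--         for l in letter:
--             if helper(dieWords, currStr+l, start+1, ans):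
--                 return True
--         return False
--
--     ans = []
--     queryResult = helper(dieWords, "", 0, ans)
--     return ans, queryResult
-- ===== SOURCE B (Python) =====
-- def queryWord(dieWord, target):
--     '''
--     check the query word
--     '''
--
--     if not dieWord:
--         return []
--
--     dieWords = [dieWord] * 3           #die number is 3 here
--
--     print ("dieWords: ", dieWords)
--
--     # enumerate the whole 3-die product up front (same order as the DFS),
--     # then cut the list at the first occurrence of target, if any
--     combos = [a + b + c for a in dieWord for b in dieWord for c in dieWord]
--     try:
--         i = combos.index(target)
--         return combos[:i + 1], True
--     except ValueError:
--         return combos, False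
-- ===== Notes on version B (the rewrite author's own statement) =====
-- stated objective: idiomatic
-- what changed: Replaces the recursive DFS helper with mutable accumulator and early-return flag by a flat comprehension enumerating the full 3-letter product, then list.index + slice to truncate at the first hit.
-- outside the precondition, e.g. on queryWord('', 'a'): A returns (), B returns ()
import Mathlib
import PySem

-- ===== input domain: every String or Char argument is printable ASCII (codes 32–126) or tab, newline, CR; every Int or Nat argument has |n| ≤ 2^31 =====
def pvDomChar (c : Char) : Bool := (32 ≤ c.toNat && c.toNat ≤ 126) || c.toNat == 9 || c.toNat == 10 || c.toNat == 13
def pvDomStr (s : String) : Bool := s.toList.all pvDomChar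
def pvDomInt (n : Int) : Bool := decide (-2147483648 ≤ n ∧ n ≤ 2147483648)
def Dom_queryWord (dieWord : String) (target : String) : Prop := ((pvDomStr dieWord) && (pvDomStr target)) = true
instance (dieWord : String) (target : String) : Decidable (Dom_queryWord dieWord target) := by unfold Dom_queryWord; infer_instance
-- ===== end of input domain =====

-- B replaces A's recursive DFS (mutable ans, early-return flag) by full product
-- enumeration + index/slice; equivalence is about the RETURN value only (A's
-- print side effect is not modelled).

-- ===== PORT A =====
-- A's helper: recursion over the remaining dice (rest = dieWords[start:]), inner
-- loop over the letters of the current die; ans is threaded, Bool = early return.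
mutual
def pvHelperA (target : String) (rest : List String) (currStr : String) (ans : List String) : List String × Bool :=
  match rest with
  | [] => (ans ++ [currStr], target == currStr)
  | letter :: rest' => pvLoopA target rest' currStr letter.toList ans
  termination_by (rest.length, 0, 0)
def pvLoopA (target : String) (rest' : List String) (currStr : String) (ls : List Char) (ans : List String) : List String × Bool :=
  match ls with
  | [] => (ans, false)
  | l :: ls' =>
    let r := pvHelperA target rest' (currStr.push l) ans
    if r.2 then (r.1, true) else pvLoopA target rest' currStr ls' r.1
  termination_by (rest'.length, 1, ls.length)
end

def queryWord (dieWord : String) (target : String) : List String × Bool :=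
  if dieWord = "" then ([], false)   -- A returns a bare list here; outside Pre_
  else pvHelperA target [dieWord, dieWord, dieWord] "" []

-- ===== PORT B =====
def queryWord_alt (dieWord : String) (target : String) : List String × Bool :=
  if dieWord = "" then ([], false)   -- outside Pre_
  else
    let cs := dieWord.toList
    let combos := cs.flatMap (fun a => cs.flatMap (fun b => cs.map (fun c => String.ofList [a, b, c])))
    match PySem.List.index? combos target with
    | some i => (combos.take (i + 1), true)
    | none => (combos, false)

-- ===== PRECONDITION & SPEC =====
-- Pre_ excludes only the empty dieWord, on which A returns a bare list [] instead
-- of a (list, bool) pair, leaving the declared return type.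
def Pre_queryWord (dieWord : String) (target : String) : Prop := dieWord ≠ ""
instance (dieWord : String) (target : String) : Decidable (Pre_queryWord dieWord target) := by unfold Pre_queryWord; infer_instance
def pvWitness_queryWord : String × String := ("ab", "aba")
def Spec_queryWord (dieWord : String) (target : String) (out : List String × Bool) : Prop := out = queryWord_alt dieWord target
instance (dieWord : String) (target : String) (out : List String × Bool) : Decidable (Spec_queryWord dieWord target out) := by unfold Spec_queryWord; infer_instance

-- ===== CLAIM (what is proved, stated in full; the proofs are below) =====
def Claim_equal_queryWord : Prop := ∀ (dieWord : String) (target : String), Dom_queryWord dieWord target → Pre_queryWord dieWord target → Spec_queryWord dieWord target (queryWord dieWord target)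

-- ===== LEMMAS AND PROOFS =====

-- the DFS enumeration order of the remaining dice, as a list
def pvEnum (rest : List String) (curr : String) : List String :=
  match rest with
  | [] => [curr]
  | w :: r => w.toList.flatMap (fun l => pvEnum r (curr.push l))

-- take through the first occurrence of t (inclusive), with a found flag
def pvTT (t : String) : List String → List String × Bool
  | [] => ([], false)
  | x :: xs => if x = t then ([x], true) else
      let r := pvTT t xs
      (x :: r.1, r.2)

theorem pvTT_append (t : String) (xs ys : List String) :
    pvTT t (xs ++ ys) =
      if (pvTT t xs).2 then pvTT t xs
      else ((pvTT t xs).1 ++ (pvTT t ys).1, (pvTT t ys).2) := by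
  induction xs with
  | nil => simp [pvTT]
  | cons x xs ih =>
    by_cases h : x = t <;> simp [pvTT, h, ih] <;> split_ifs <;> simp

theorem pvLoopA_spec (t : String) (rest' : List String)
    (IH : ∀ curr ans, pvHelperA t rest' curr ans =
        (ans ++ (pvTT t (pvEnum rest' curr)).1, (pvTT t (pvEnum rest' curr)).2))
    (ls : List Char) (curr : String) (ans : List String) :
    pvLoopA t rest' curr ls ans =
      (ans ++ (pvTT t (ls.flatMap (fun l => pvEnum rest' (curr.push l)))).1,
        (pvTT t (ls.flatMap (fun l => pvEnum rest' (curr.push l)))).2) := by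
  induction ls generalizing ans with
  | nil => simp [pvLoopA, pvTT]
  | cons l ls' ih =>
    rw [pvLoopA, IH]
    simp only [List.flatMap_cons]
    rw [pvTT_append]
    by_cases h : (pvTT t (pvEnum rest' (curr.push l))).2 <;> simp [h, ih]

theorem pvHelperA_spec (t : String) (rest : List String) (curr : String) (ans : List String) :
    pvHelperA t rest curr ans =
      (ans ++ (pvTT t (pvEnum rest curr)).1, (pvTT t (pvEnum rest curr)).2) := by
  induction rest generalizing curr ans with
  | nil =>
    rw [pvHelperA]
    by_cases h : curr = t <;>
      simp [pvEnum, pvTT, h, eq_comm (a := t) (b := curr)]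
  | cons w rest' ih =>
    rw [pvHelperA, pvEnum]
    exact pvLoopA_spec t rest' (fun c a => ih c a) w.toList curr ans

theorem pvIndexTake (t : String) (xs : List String) :
    (match PySem.List.index? xs t with
      | some i => (xs.take (i + 1), true)
      | none => (xs, false)) = pvTT t xs := by
  induction xs with
  | nil => simp [PySem.List.index?_eq_idxOf?, pvTT]
  | cons x xs ih =>
    rw [PySem.List.index?_eq_idxOf?] at ih ⊢
    rw [List.idxOf?_cons]
    by_cases h : x = t
    · subst h
      simp [pvTT]
    · have hne : (x == t) = false := by simp [h]
      rw [hne]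
      simp only [Bool.false_eq_true, if_false]
      cases hi : List.idxOf? t xs <;> rw [hi] at ih <;>
        simp [pvTT, h, ← ih, List.take_succ_cons, Option.map]

theorem pvString_push3 (a b c : Char) : (("".push a).push b).push c = String.ofList [a, b, c] := by
  rw [← String.toList_inj]
  simp [String.toList_push]

-- ===== VERDICT (by name: the statement is the Claim_ definition above) =====
theorem queryWord_spec : Claim_equal_queryWord := by
  intro dieWord target _hdom hpre
  unfold Spec_queryWord queryWord queryWord_alt
  rw [if_neg hpre, if_neg hpre]
  rw [pvHelperA_spec]
  have hc : pvEnum [dieWord, dieWord, dieWord] "" =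
      dieWord.toList.flatMap (fun a => dieWord.toList.flatMap (fun b =>
        dieWord.toList.map (fun c => String.ofList [a, b, c]))) := by
    simp only [pvEnum]
    refine List.flatMap_congr (fun a _ => ?_)
    refine List.flatMap_congr (fun b _ => ?_)
    rw [List.map_eq_flatMap]
    refine List.flatMap_congr (fun c _ => ?_)
    rw [pvString_push3]
  rw [hc, pvIndexTake]
  simp
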